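-- pv_equiv track=rewrite | github.com/RFQED/AdventOfCode23 | day02pt2/pycheck.py | fn
-- ===== SOURCE A (Python) =====
-- def fn(gd):
--     checks = gd.split(';')
--     mc3 = {'red': 0, 'green': 0, 'blue': 0}
--
--     for check in checks:
--         c3 = {'red': 0, 'green': 0, 'blue': 0}
--         for dat in check.split(','):
--             dat = dat.strip()
--             if dat:
--                 c, col = dat.split()
--                 c3[col] += int(c)
--
--         for col in mc3:
--             mc3[col] = max(mc3[col], c3[col])
--
--     return mc3
-- ===== SOURCE B (Python) =====
-- def fn(gd):
--     # Phase 1: parse each round into its raw (color, count) pairs.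
--     rounds = []
--     for check in gd.split(';'):
--         pairs = []
--         for dat in check.split(','):
--             dat = dat.strip()
--             if dat:
--                 c, col = dat.split()
--                 pairs.append((col, int(c)))
--         rounds.append(pairs)
--     # Phase 2: per color, take the max round total (0 as the baseline).
--     return {col: max([0] + [sum(n for c2, n in pairs if c2 == col) for pairs in rounds])
--             for col in ('red', 'green', 'blue')}
-- ===== Notes on version B (the rewrite author's own statement) =====
-- stated objective: alternative
-- what changed: B splits A's single accumulate-and-max pass into two phases: it first parses every round into a raw list of (color, count) pairs, then builds the result with a per-color comprehension taking max([0] + per-round sums) over the collected rounds, instead of folding maxes into a running dict during parsing.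
import Mathlib
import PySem

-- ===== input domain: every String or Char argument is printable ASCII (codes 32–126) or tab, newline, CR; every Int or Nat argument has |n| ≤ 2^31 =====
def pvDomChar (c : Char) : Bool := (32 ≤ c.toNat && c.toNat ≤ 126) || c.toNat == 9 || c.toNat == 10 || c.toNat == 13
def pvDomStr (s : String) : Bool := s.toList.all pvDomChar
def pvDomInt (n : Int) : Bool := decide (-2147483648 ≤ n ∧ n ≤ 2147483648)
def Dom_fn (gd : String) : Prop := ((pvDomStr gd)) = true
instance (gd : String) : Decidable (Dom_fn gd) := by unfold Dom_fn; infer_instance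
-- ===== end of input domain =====

-- B separates parsing (each round as its raw (color,count) pair list) from aggregation (per-color
-- max of per-round sums); objective: alternative decomposition, same values wherever A returns.

-- ===== PORT A =====
-- the literal starting dict {'red': 0, 'green': 0, 'blue': 0}
def pyDictInit : PySem.Dict String Int := PySem.Dict.ofList [("red", 0), ("green", 0), ("blue", 0)]

-- inner loop body of A: one 'dat' token folded into the per-round dict c3 (none = where Python raises)
def roundStepA (c3 : PySem.Dict String Int) (dat0 : String) : Option (PySem.Dict String Int) :=
  let dat := PySem.Str.strip dat0
  if dat ≠ "" then
    match PySem.Str.split₀ dat with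
    | [c, col] =>
      -- c3[col] += int(c): the lookup c3[col] (KeyError → none), then int(c) (ValueError → none)
      match c3.get? col with
      | some v => (PySem.Int.ofStr? c).map (fun n => c3.insert col (v + n))
      | none => none
    | _ => none  -- 'c, col = dat.split()' unpack failure (ValueError → none)
  else some c3

-- one iteration of A's outer loop: build c3 for one check, then fold the maxes into mc3
def checkStepA (mc3 : PySem.Dict String Int) (check : String) : Option (PySem.Dict String Int) := do
  -- sep "," is a nonempty literal, so split? is always some; the .getD [] default never fires
  let c3 ← ((PySem.Str.split? check ",").getD []).foldlM roundStepA pyDictInit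
  return mc3.keys.foldl (fun m col => m.insert col (max (m.getD col 0) (c3.getD col 0))) mc3

def fn (gd : String) : List (String × Int) :=
  -- sep ";" is a nonempty literal, so split? is always some; the .getD [] default never fires
  match ((PySem.Str.split? gd ";").getD []).foldlM checkStepA pyDictInit with
  | some m => m.items
  | none => []  -- unreachable under Pre_fn (Python raises there)

-- ===== PORT B =====
-- B phase 1, inner step: append one parsed (color, count) pair (none = where Python raises)
def pairStepB (pairs : List (String × Int)) (dat0 : String) : Option (List (String × Int)) :=
  let dat := PySem.Str.strip dat0
  if dat ≠ "" then
    match PySem.Str.split₀ dat with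
    | [c, col] => (PySem.Int.ofStr? c).map (fun n => pairs ++ [(col, n)])
    | _ => none
  else some pairs

-- B phase 1: parse one check into its raw (color, count) pairs
def parseRoundB (check : String) : Option (List (String × Int)) :=
  ((PySem.Str.split? check ",").getD []).foldlM pairStepB []

def fn_alt (gd : String) : List (String × Int) :=
  match ((PySem.Str.split? gd ";").getD []).mapM parseRoundB with
  | some rounds =>
      -- B phase 2: {col: max([0] + [sum(n for c2, n in pairs if c2 == col) for pairs in rounds]) …}
      ["red", "green", "blue"].map (fun col =>
        (col, (PySem.List.max? (0 :: rounds.map (fun pairs =>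
            ((pairs.filter (fun p => p.1 == col)).map (·.2)).sum)) (fun x => x)).getD 0))
  | none => []  -- unreachable under Pre_fn

-- ===== PRECONDITION & SPEC =====
-- a 'dat' token A accepts: blank after strip, or exactly two fields whose first is int()-parsable
-- and whose second is one of the three dict keys (otherwise Python raises ValueError/KeyError)
def tokOK (dat : String) : Bool :=
  if PySem.Str.strip dat == "" then true
  else
    match PySem.Str.split₀ (PySem.Str.strip dat) with
    | [c, col] => (PySem.Int.ofStr? c).isSome && (col == "red" || col == "green" || col == "blue")
    | _ => false

-- Pre_ excludes exactly the inputs on which A raises (ValueError from the two-way unpack or int(),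
-- KeyError on a color other than red/green/blue); A returns on everything Pre_ admits.
def Pre_fn (gd : String) : Prop :=
  ∀ check ∈ (PySem.Str.split? gd ";").getD [],
    ∀ dat ∈ (PySem.Str.split? check ",").getD [], tokOK dat = true
instance (gd : String) : Decidable (Pre_fn gd) := by unfold Pre_fn; infer_instance

def pvWitness_fn : String := " 3 red, 4 blue ; 1 green, 2 red"

def Spec_fn (gd : String) (out : List (String × Int)) : Prop := out = fn_alt gd
instance (gd : String) (out : List (String × Int)) : Decidable (Spec_fn gd out) := by
  unfold Spec_fn; infer_instance

-- ===== CLAIM (what is proved, stated in full; the proofs are below) =====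
def Claim_equal_fn : Prop := ∀ (gd : String), Dom_fn gd → Pre_fn gd → Spec_fn gd (fn gd)

-- ===== LEMMAS AND PROOFS =====

-- the (color, count) pairs a token list denotes, read off the token strings directly
def toks : List String → List (String × Int)
  | [] => []
  | dat :: L =>
    match PySem.Str.split₀ (PySem.Str.strip dat) with
    | [c, col] =>
      match PySem.Int.ofStr? c with
      | some n => (col, n) :: toks L
      | none => toks L
    | _ => toks L

-- per-color total of a pair list (B's phase-2 inner sum)
def colSum (col : String) (ps : List (String × Int)) : Int :=
  ((ps.filter (fun p => p.1 == col)).map (·.2)).sum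

-- the three-key dict with given values
def mkd (a b c : Int) : PySem.Dict String Int :=
  PySem.Dict.mk [("red", a), ("green", b), ("blue", c)]

-- per-check per-color totals of a whole game
def roundSums (col : String) (checks : List String) : List Int :=
  checks.map (fun ch => colSum col (toks ((PySem.Str.split? ch ",").getD [])))

theorem split₀_empty : PySem.Str.split₀ "" = [] := rfl

theorem toks_cons (dat : String) (L : List String) :
    toks (dat :: L) =
      (match PySem.Str.split₀ (PySem.Str.strip dat) with
       | [c, col] =>
         match PySem.Int.ofStr? c with
         | some n => (col, n) :: toks L
         | none => toks L
       | _ => toks L) := by rw [toks]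

-- A's inner loop over the tokens of one check, on the three-key dict shape
theorem roundA_eq (L : List String) (hok : ∀ dat ∈ L, tokOK dat = true) (a b c : Int) :
    L.foldlM roundStepA (mkd a b c) =
      some (mkd (a + colSum "red" (toks L)) (b + colSum "green" (toks L))
                (c + colSum "blue" (toks L))) := by
  induction L generalizing a b c with
  | nil => simp [toks, colSum]
  | cons dat L ih =>
    have hrest : ∀ d ∈ L, tokOK d = true := fun d hdm => hok d (by simp [hdm])
    have hd := hok dat (by simp)
    by_cases hs : PySem.Str.strip dat = ""
    · have hstep : List.foldlM roundStepA (mkd a b c) (dat :: L)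
          = L.foldlM roundStepA (mkd a b c) := by
        simp [List.foldlM, roundStepA, hs]
      rw [hstep, ih hrest, toks_cons, hs, split₀_empty]
    · rcases h3 : PySem.Str.split₀ (PySem.Str.strip dat) with _ | ⟨cc, _ | ⟨col, _ | _⟩⟩ <;>
        simp [tokOK, hs, h3] at hd
      obtain ⟨n, hn⟩ := Option.isSome_iff_exists.mp hd.1
      rcases hd.2 with (h | h) | h <;> subst h
      · have hstep : List.foldlM roundStepA (mkd a b c) (dat :: L)
            = L.foldlM roundStepA (mkd (a + n) b c) := by
          simp [List.foldlM, roundStepA, hs, h3, hn, mkd, PySem.Dict.get?, PySem.Dict.insert,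
            PySem.Dict.contains]
        rw [hstep, ih hrest, toks_cons, h3]
        simp [hn, colSum, mkd]
        omega
      · have hstep : List.foldlM roundStepA (mkd a b c) (dat :: L)
            = L.foldlM roundStepA (mkd a (b + n) c) := by
          simp [List.foldlM, roundStepA, hs, h3, hn, mkd, PySem.Dict.get?, PySem.Dict.insert,
            PySem.Dict.contains]
        rw [hstep, ih hrest, toks_cons, h3]
        simp [hn, colSum, mkd]
        omega
      · have hstep : List.foldlM roundStepA (mkd a b c) (dat :: L)
            = L.foldlM roundStepA (mkd a b (c + n)) := by
          simp [List.foldlM, roundStepA, hs, h3, hn, mkd, PySem.Dict.get?, PySem.Dict.insert,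
            PySem.Dict.contains]
        rw [hstep, ih hrest, toks_cons, h3]
        simp [hn, colSum, mkd]
        omega

-- one outer iteration of A: the dict shape is preserved and each value is maxed
theorem checkA_eq (check : String)
    (hok : ∀ dat ∈ (PySem.Str.split? check ",").getD [], tokOK dat = true) (x y z : Int) :
    checkStepA (mkd x y z) check =
      some (mkd (max x (colSum "red" (toks ((PySem.Str.split? check ",").getD []))))
                (max y (colSum "green" (toks ((PySem.Str.split? check ",").getD []))))
                (max z (colSum "blue" (toks ((PySem.Str.split? check ",").getD []))))) := by
  have hinit : pyDictInit = mkd 0 0 0 := rfl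
  rw [checkStepA, hinit, roundA_eq _ hok]
  simp [mkd, PySem.Dict.keys, PySem.Dict.insert, PySem.Dict.contains, PySem.Dict.getD,
    PySem.Dict.get?]

-- A's whole outer loop: a running per-color foldl max
theorem checksA_eq (checks : List String)
    (hok : ∀ ch ∈ checks, ∀ dat ∈ (PySem.Str.split? ch ",").getD [], tokOK dat = true)
    (x y z : Int) :
    checks.foldlM checkStepA (mkd x y z) =
      some (mkd ((roundSums "red" checks).foldl max x)
                ((roundSums "green" checks).foldl max y)
                ((roundSums "blue" checks).foldl max z)) := by
  induction checks generalizing x y z with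
  | nil => simp [roundSums]
  | cons ch checks ih =>
    have h1 := hok ch (by simp)
    have hrest : ∀ c ∈ checks, ∀ dat ∈ (PySem.Str.split? c ",").getD [], tokOK dat = true :=
      fun c hc => hok c (by simp [hc])
    have hstep : List.foldlM checkStepA (mkd x y z) (ch :: checks)
        = checks.foldlM checkStepA
            (mkd (max x (colSum "red" (toks ((PySem.Str.split? ch ",").getD []))))
                 (max y (colSum "green" (toks ((PySem.Str.split? ch ",").getD []))))
                 (max z (colSum "blue" (toks ((PySem.Str.split? ch ",").getD []))))) := by
      simp [List.foldlM, checkA_eq ch h1]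
    rw [hstep, ih hrest]
    simp [roundSums]

-- B's phase-1 inner loop produces exactly the token pairs
theorem roundB_eq (L : List String) (hok : ∀ dat ∈ L, tokOK dat = true)
    (acc : List (String × Int)) :
    L.foldlM pairStepB acc = some (acc ++ toks L) := by
  induction L generalizing acc with
  | nil => simp [toks]
  | cons dat L ih =>
    have hrest : ∀ d ∈ L, tokOK d = true := fun d hdm => hok d (by simp [hdm])
    have hd := hok dat (by simp)
    by_cases hs : PySem.Str.strip dat = ""
    · have hstep : List.foldlM pairStepB acc (dat :: L) = L.foldlM pairStepB acc := by
        simp [List.foldlM, pairStepB, hs]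
      rw [hstep, ih hrest, toks_cons, hs, split₀_empty]
    · rcases h3 : PySem.Str.split₀ (PySem.Str.strip dat) with _ | ⟨cc, _ | ⟨col, _ | _⟩⟩ <;>
        simp [tokOK, hs, h3] at hd
      obtain ⟨n, hn⟩ := Option.isSome_iff_exists.mp hd.1
      have hstep : List.foldlM pairStepB acc (dat :: L)
          = L.foldlM pairStepB (acc ++ [(col, n)]) := by
        simp [List.foldlM, pairStepB, hs, h3, hn]
      rw [hstep, ih hrest, toks_cons, h3]
      simp [hn]

-- B's phase 1 over the whole game
theorem mapB_eq (checks : List String)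
    (hok : ∀ ch ∈ checks, ∀ dat ∈ (PySem.Str.split? ch ",").getD [], tokOK dat = true) :
    checks.mapM parseRoundB
      = some (checks.map (fun ch => toks ((PySem.Str.split? ch ",").getD []))) := by
  induction checks with
  | nil => simp
  | cons ch checks ih =>
    have h1 := hok ch (by simp)
    have hrest : ∀ c ∈ checks, ∀ dat ∈ (PySem.Str.split? c ",").getD [], tokOK dat = true :=
      fun c hc => hok c (by simp [hc])
    have hp : parseRoundB ch = some (toks ((PySem.Str.split? ch ",").getD [])) := by
      rw [parseRoundB, roundB_eq _ h1]; simp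
    simp [List.mapM_cons, hp, ih hrest]

-- Python's max of a nonempty Int list is foldl max
theorem max?_cons_eq (l : List Int) (a : Int) :
    PySem.List.max? (a :: l) (fun x => x) = some (l.foldl max a) := by
  have key : ∀ (l : List Int) (a : Int),
      l.foldl (fun acc x => match acc with
        | none => some x
        | some m => if (m : Int) < x then some x else some m) (some a)
        = some (l.foldl max a) := by
    intro l
    induction l with
    | nil => intro a; rfl
    | cons x l ih =>
      intro a
      have hmax : (if a < x then some x else some a) = some (max a x) := by
        split_ifs with h <;> (congr 1; omega)
      simp [List.foldl, hmax, ih]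
  rw [PySem.List.max?]
  simp [List.foldl]
  convert key l a using 2
  funext acc x
  cases acc <;> rfl

-- ===== VERDICT (by name: the statement is the Claim_ definition above) =====
theorem fn_spec : Claim_equal_fn := by
  intro gd _ hpre
  unfold Spec_fn
  have hinit : pyDictInit = mkd 0 0 0 := rfl
  rw [fn, fn_alt, hinit, checksA_eq _ hpre, mapB_eq _ hpre]
  simp [mkd, roundSums, colSum, List.map_map, max?_cons_eq]
  exact ⟨rfl, rfl, rfl⟩
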